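-- pv_equiv track=rewrite | github.com/AskMinto/minto | backend/app/services/xlsx_extractor.py | _detect_blocks
-- ===== SOURCE A (Python) =====
-- from typing import Generator
--
-- _MIN_CELLS = 2
--
-- _MIN_BLOCK_ROWS = 2
--
-- def _detect_blocks(all_rows: list[tuple]) -> Generator[list[list], None, None]:
--     """Yield contiguous non-empty row blocks from a worksheet's raw rows.
--
--     A block is a contiguous sequence of rows each having >= _MIN_CELLS non-None
--     values. Blocks are separated by rows with fewer than _MIN_CELLS non-None values.
--     """
--     current_block: list[list] = []
--
--     for row in all_rows:
--         non_null_count = sum(1 for v in row if v is not None)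
--         if non_null_count >= _MIN_CELLS:
--             current_block.append(list(row))
--         else:
--             if len(current_block) >= _MIN_BLOCK_ROWS:
--                 yield current_block
--             current_block = []
--
--     if len(current_block) >= _MIN_BLOCK_ROWS:
--         yield current_block
-- ===== SOURCE B (Python) =====
-- _MIN_CELLS = 2
--
-- _MIN_BLOCK_ROWS = 2
--
--
-- def _is_full(row):
--     return sum(v is not None for v in row) >= _MIN_CELLS
--
--
-- def _detect_blocks(all_rows):
--     """Run-splitting rewrite: scan maximal contiguous runs of 'full' rows
--     with a cursor over the remaining rows; no accumulator, no end flush."""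
--     rest = list(all_rows)
--     while rest:
--         if _is_full(rest[0]):
--             k = 1
--             while k < len(rest) and _is_full(rest[k]):
--                 k += 1
--             if k >= _MIN_BLOCK_ROWS:
--                 yield [list(r) for r in rest[:k]]
--             rest = rest[k:]
--         else:
--             rest = rest[1:]
-- ===== Notes on version B (the rewrite author's own statement) =====
-- stated objective: alternative
-- what changed: Replaces A's current_block accumulator with end-of-input flush by a cursor that splits off each maximal contiguous run of full rows (takeWhile/dropWhile) and keeps runs of length >= 2; no accumulator state, no flush logic.
import Mathlib
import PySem

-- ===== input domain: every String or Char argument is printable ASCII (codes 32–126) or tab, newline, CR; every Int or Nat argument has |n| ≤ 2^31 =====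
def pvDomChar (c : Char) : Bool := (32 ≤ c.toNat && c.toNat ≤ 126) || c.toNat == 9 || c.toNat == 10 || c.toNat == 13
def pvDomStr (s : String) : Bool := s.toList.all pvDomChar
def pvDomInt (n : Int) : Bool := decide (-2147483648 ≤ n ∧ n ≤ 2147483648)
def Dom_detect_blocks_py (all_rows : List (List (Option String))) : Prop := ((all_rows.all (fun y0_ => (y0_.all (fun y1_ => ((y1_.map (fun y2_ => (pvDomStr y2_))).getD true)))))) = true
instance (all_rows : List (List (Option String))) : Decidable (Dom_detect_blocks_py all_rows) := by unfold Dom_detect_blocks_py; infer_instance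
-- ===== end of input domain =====

-- B replaces A's accumulator-and-flush state machine by a cursor that splits off
-- maximal contiguous runs of full rows (objective: alternative decomposition, same cost).

-- ===== PORT A =====
-- non_null_count = sum(1 for v in row if v is not None)
def pvNonNull (row : List (Option String)) : Nat :=
  row.foldl (fun n v => if v = none then n else n + 1) 0

-- the loop body of A over the state (blocks yielded so far, current_block)
def pvStepA (st : List (List (List (Option String))) × List (List (Option String)))
    (row : List (Option String)) :
    List (List (List (Option String))) × List (List (Option String)) :=
  if 2 ≤ pvNonNull row then (st.1, st.2 ++ [row])
  else if 2 ≤ st.2.length then (st.1 ++ [st.2], []) else (st.1, [])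

def detect_blocks_py (all_rows : List (List (Option String))) : List (List (List (Option String))) :=
  let st := all_rows.foldl pvStepA ([], [])
  if 2 ≤ st.2.length then st.1 ++ [st.2] else st.1

-- ===== PORT B =====
-- _is_full(row): sum(v is not None for v in row) >= _MIN_CELLS
def pvRowFull (row : List (Option String)) : Bool :=
  2 ≤ row.countP (fun v => v.isSome)

-- cursor loop: split off the maximal run of full rows, keep it if long enough
def detect_blocks_py_alt : List (List (Option String)) → List (List (List (Option String)))
  | [] => []
  | r :: rs =>
    if pvRowFull r then
      let blk := List.takeWhile pvRowFull (r :: rs)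
      (if 2 ≤ blk.length then [blk] else []) ++ detect_blocks_py_alt (List.dropWhile pvRowFull rs)
    else detect_blocks_py_alt rs
termination_by l => l.length
decreasing_by
· have := List.length_dropWhile_le (p := pvRowFull) (l := rs); simp; omega
· simp

-- ===== PRECONDITION & SPEC =====
def Spec_detect_blocks_py (all_rows : List (List (Option String))) (out : List (List (List (Option String)))) : Prop := out = detect_blocks_py_alt all_rows
instance (all_rows : List (List (Option String))) (out : List (List (List (Option String)))) : Decidable (Spec_detect_blocks_py all_rows out) := by unfold Spec_detect_blocks_py; infer_instance

-- ===== CLAIM (what is proved, stated in full; the proofs are below) =====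
def Claim_equal_detect_blocks_py : Prop := ∀ (all_rows : List (List (Option String))), Dom_detect_blocks_py all_rows → Spec_detect_blocks_py all_rows (detect_blocks_py all_rows)

-- ===== LEMMAS AND PROOFS =====

-- yield-at-end of A, as a function of the pending block
def pvFlush (cur : List (List (Option String))) : List (List (List (Option String))) :=
  if 2 ≤ cur.length then [cur] else []

-- A's loop started with pending block `cur`, plus the final flush
def pvArun (cur : List (List (Option String))) (rows : List (List (Option String))) :
    List (List (List (Option String))) :=
  let st := rows.foldl pvStepA ([], cur)
  st.1 ++ pvFlush st.2

lemma pvNonNull_eq (row : List (Option String)) (a : Nat) :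
    row.foldl (fun n v => if v = none then n else n + 1) a = a + row.countP (fun v => v.isSome) := by
  induction row generalizing a with
  | nil => simp
  | cons v t ih => cases v <;> simp [List.countP_cons, ih] <;> omega

lemma pvFull_iff (row : List (Option String)) :
    (2 ≤ pvNonNull row) ↔ pvRowFull row = true := by
  simp [pvNonNull, pvRowFull, pvNonNull_eq]

lemma pvFold_shift (rows : List (List (Option String)))
    (bs : List (List (List (Option String)))) (cur : List (List (Option String))) :
    rows.foldl pvStepA (bs, cur) =
      (bs ++ (rows.foldl pvStepA ([], cur)).1, (rows.foldl pvStepA ([], cur)).2) := by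
  induction rows generalizing bs cur with
  | nil => simp
  | cons r rs ih =>
    simp only [List.foldl_cons, pvStepA]
    split_ifs with h1 h2
    · exact ih bs (cur ++ [r])
    · simp only [List.nil_append]
      rw [ih (bs ++ [cur]) [], ih [cur] []]
      simp
    · exact ih bs []

lemma pvAlt_fix (rows : List (List (Option String))) :
    pvFlush (rows.takeWhile pvRowFull) ++ detect_blocks_py_alt (rows.dropWhile pvRowFull)
      = detect_blocks_py_alt rows := by
  cases rows with
  | nil => simp [pvFlush]
  | cons r rs =>
    by_cases h : pvRowFull r
    · rw [detect_blocks_py_alt]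
      simp [h, pvFlush]
    · have he : detect_blocks_py_alt (r :: rs) = detect_blocks_py_alt rs := by
        rw [detect_blocks_py_alt]; simp [h]
      simp [h, pvFlush, he]

lemma pvRun : ∀ (n : Nat) (rows : List (List (Option String))), rows.length ≤ n →
    ∀ cur, pvArun cur rows =
      pvFlush (cur ++ rows.takeWhile pvRowFull) ++ detect_blocks_py_alt (rows.dropWhile pvRowFull) := by
  intro n
  induction n with
  | zero =>
    intro rows h cur
    have : rows = [] := List.eq_nil_of_length_eq_zero (Nat.le_zero.mp h)
    subst this; simp [pvArun, detect_blocks_py_alt]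
  | succ m ih =>
    intro rows h cur
    cases rows with
    | nil => simp [pvArun, detect_blocks_py_alt]
    | cons r rs =>
      have hlen : rs.length ≤ m := by simpa using Nat.lt_succ_iff.mp (Nat.lt_of_lt_of_le (by simp) h)
      by_cases hf : pvRowFull r
      · have hfull : 2 ≤ pvNonNull r := (pvFull_iff r).mpr hf
        have : pvArun cur (r :: rs) = pvArun (cur ++ [r]) rs := by
          simp [pvArun, pvStepA, hfull]
        rw [this, ih rs hlen (cur ++ [r])]
        simp [List.takeWhile_cons, List.dropWhile_cons, hf]
      · have hnf : ¬ 2 ≤ pvNonNull r := fun hc => hf ((pvFull_iff r).mp hc)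
        have step1 : pvArun cur (r :: rs) = pvFlush cur ++ pvArun [] rs := by
          have hstep : List.foldl pvStepA ([], cur) (r :: rs)
              = List.foldl pvStepA (pvFlush cur, []) rs := by
            simp only [List.foldl_cons, pvStepA, pvFlush]
            split_ifs with h1 h2 <;> simp_all
          simp only [pvArun, hstep, pvFold_shift rs (pvFlush cur) []]
          simp
        rw [step1, ih rs hlen []]
        simp only [List.nil_append]
        rw [pvAlt_fix rs]
        have : detect_blocks_py_alt (r :: rs) = detect_blocks_py_alt rs := by
          rw [detect_blocks_py_alt]; simp [hf]
        simp [List.takeWhile_cons, List.dropWhile_cons, hf, this]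

lemma pvA_eq_Arun (rows : List (List (Option String))) :
    detect_blocks_py rows = pvArun [] rows := by
  simp only [detect_blocks_py, pvArun, pvFlush]
  split_ifs <;> simp

-- ===== VERDICT (by name: the statement is the Claim_ definition above) =====
theorem detect_blocks_py_spec : Claim_equal_detect_blocks_py := by
  intro rows _
  unfold Spec_detect_blocks_py
  rw [pvA_eq_Arun, pvRun rows.length rows le_rfl []]
  simpa using pvAlt_fix rows
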